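-- pv_equiv track=rewrite | github.com/AntonDubovitskii/GB-Homework | Dubovitskii_Anton_dz_5/task_5_3.py | check_gen
-- ===== SOURCE A (Python) =====
-- def check_gen(tutors: list, klasses: list):
--     n = 0
--
--     for _ in range(1, len(tutors) + 1):
--         if n > len(klasses) - 1:                             # Если количество элементов в списке tutore больше чем в
--             result_tuple = (tutors[n], None)                 # klasses - вместо недостающих элементов подставляется None
--         else:
--             result_tuple = (tutors[n], klasses[n])
--         n += 1
--         yield result_tuple
-- ===== SOURCE B (Python) =====
-- def check_gen(tutors: list, klasses: list):
--     common = min(len(tutors), len(klasses))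
--     for t, k in zip(tutors[:common], klasses[:common]):
--         yield (t, k)
--     for t in tutors[common:]:
--         yield (t, None)
-- ===== Notes on version B (the rewrite author's own statement) =====
-- stated objective: simpler
-- what changed: Replaces A's single indexed loop with a per-iteration length comparison by a precomputed split point: a zip over the overlapping prefix, then a flat pass over the leftover tutors, with no index variable at all.
import Mathlib
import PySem

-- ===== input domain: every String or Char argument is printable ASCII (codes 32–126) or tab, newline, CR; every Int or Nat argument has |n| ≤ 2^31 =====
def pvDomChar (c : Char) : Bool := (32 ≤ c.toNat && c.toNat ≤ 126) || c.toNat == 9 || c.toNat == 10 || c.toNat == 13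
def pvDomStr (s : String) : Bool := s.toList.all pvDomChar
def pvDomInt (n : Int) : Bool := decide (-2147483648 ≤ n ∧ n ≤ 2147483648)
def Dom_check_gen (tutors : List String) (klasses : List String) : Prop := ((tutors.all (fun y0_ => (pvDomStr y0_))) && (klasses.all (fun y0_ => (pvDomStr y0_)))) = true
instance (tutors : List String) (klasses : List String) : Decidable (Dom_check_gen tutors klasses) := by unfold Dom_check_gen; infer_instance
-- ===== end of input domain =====

-- B replaces A's single indexed loop (per-step length check) by a precomputed split:
-- zip over the common prefix, then a flat pass over the leftover tutors (objective: simpler).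
-- A is a generator; both sides are ported as the list of yielded pairs.

-- ===== PORT A =====
-- literal port of A: fold over range(1, len(tutors)+1) carrying (n, accumulated yields);
-- tutors[n] is always in range here, so pyGet? is some and .getD "" never fires.
def check_gen (tutors : List String) (klasses : List String) : List (String × Option String) :=
  ((PySem.List.pyRange 1 ((tutors.length : Int) + 1) 1).foldl
    (fun (st : Int × List (String × Option String)) _ =>
      let n := st.1
      let result_tuple : String × Option String :=
        if n > (klasses.length : Int) - 1 then
          ((PySem.List.pyGet? tutors n).getD "", none)
        else
          ((PySem.List.pyGet? tutors n).getD "", PySem.List.pyGet? klasses n)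
      (n + 1, st.2 ++ [result_tuple]))
    (0, [])).2

-- ===== PORT B =====
def check_gen_alt (tutors : List String) (klasses : List String) : List (String × Option String) :=
  let common := min tutors.length klasses.length
  ((tutors.take common).zip (klasses.take common)).map (fun tk => (tk.1, some tk.2))
    ++ (tutors.drop common).map (fun t => (t, none))

-- ===== PRECONDITION & SPEC =====
def Spec_check_gen (tutors : List String) (klasses : List String) (out : List (String × Option String)) : Prop := out = check_gen_alt tutors klasses
instance (tutors : List String) (klasses : List String) (out : List (String × Option String)) : Decidable (Spec_check_gen tutors klasses out) := by unfold Spec_check_gen; infer_instance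

-- ===== CLAIM (what is proved, stated in full; the proofs are below) =====
def Claim_equal_check_gen : Prop := ∀ (tutors : List String) (klasses : List String), Dom_check_gen tutors klasses → Spec_check_gen tutors klasses (check_gen tutors klasses)

-- ===== LEMMAS AND PROOFS =====

-- the value A yields at index n
def pvItem (tutors klasses : List String) (n : Int) : String × Option String :=
  if n > (klasses.length : Int) - 1 then
    ((PySem.List.pyGet? tutors n).getD "", none)
  else
    ((PySem.List.pyGet? tutors n).getD "", PySem.List.pyGet? klasses n)

-- the m items A yields starting at index n
def pvBuild (tutors klasses : List String) : Int → Nat → List (String × Option String)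
  | _, 0 => []
  | n, m + 1 => pvItem tutors klasses n :: pvBuild tutors klasses (n + 1) m

-- A's fold appends pvItem at successive indices
theorem pvFoldA (tutors klasses : List String) :
    ∀ (l : List Int) (n : Int) (acc : List (String × Option String)),
      (l.foldl
        (fun (st : Int × List (String × Option String)) _ =>
          let n := st.1
          let result_tuple : String × Option String :=
            if n > (klasses.length : Int) - 1 then
              ((PySem.List.pyGet? tutors n).getD "", none)
            else
              ((PySem.List.pyGet? tutors n).getD "", PySem.List.pyGet? klasses n)
          (n + 1, st.2 ++ [result_tuple]))
        (n, acc)).2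
      = acc ++ pvBuild tutors klasses n l.length := by
  intro l
  induction l with
  | nil => simp [pvBuild]
  | cons x xs ih =>
      intro n acc
      simp only [List.foldl_cons, List.length_cons]
      rw [ih]
      simp [pvBuild, pvItem, List.append_assoc]

theorem check_gen_eq_build (tutors klasses : List String) :
    check_gen tutors klasses = pvBuild tutors klasses 0 tutors.length := by
  unfold check_gen
  rw [pvFoldA]
  rw [PySem.List.length_pyRange_one]
  have hlen : (((tutors.length : Int) + 1) - 1).toNat = tutors.length := by omega
  rw [hlen, List.nil_append]

theorem pvBuild_length (tutors klasses : List String) :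
    ∀ (m : Nat) (n : Int), (pvBuild tutors klasses n m).length = m := by
  intro m
  induction m with
  | zero => intro n; rfl
  | succ m ih => intro n; simp [pvBuild, ih]

theorem pvBuild_getElem (tutors klasses : List String) :
    ∀ (m : Nat) (n : Int) (i : Nat) (h : i < (pvBuild tutors klasses n m).length),
      (pvBuild tutors klasses n m)[i] = pvItem tutors klasses (n + i) := by
  intro m
  induction m with
  | zero => intro n i h; simp [pvBuild_length] at h
  | succ m ih =>
      intro n i h
      cases i with
      | zero => simp [pvBuild]
      | succ i =>
          have h' : i < (pvBuild tutors klasses (n + 1) m).length := by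
            rw [pvBuild_length] at h ⊢; omega
          simp only [pvBuild, List.getElem_cons_succ]
          rw [ih (n + 1) i h']
          congr 1
          push_cast
          ring

-- pvItem at a valid Nat index
theorem pvItem_eq (tutors klasses : List String) (i : Nat) (hi : i < tutors.length) :
    pvItem tutors klasses (i : Int)
      = (tutors[i], if h : i < klasses.length then some klasses[i] else none) := by
  unfold pvItem
  by_cases h : i < klasses.length
  · rw [if_neg (by push_cast; omega), dif_pos h]
    simp [List.getElem?_eq_getElem hi, List.getElem?_eq_getElem h]
  · rw [if_pos (by push_cast; omega), dif_neg h]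
    simp [List.getElem?_eq_getElem hi]

theorem check_gen_alt_len (tutors klasses : List String) :
    (check_gen_alt tutors klasses).length = tutors.length := by
  unfold check_gen_alt
  simp [List.length_zip]

-- ===== VERDICT (by name: the statement is the Claim_ definition above) =====
theorem check_gen_spec : Claim_equal_check_gen := by
  intro tutors klasses _
  unfold Spec_check_gen
  rw [check_gen_eq_build]
  apply List.ext_getElem
  · rw [pvBuild_length, check_gen_alt_len]
  · intro i h1 h2
    rw [pvBuild_getElem]
    rw [zero_add, pvItem_eq tutors klasses i (by rw [pvBuild_length] at h1; exact h1)]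
    rw [pvBuild_length] at h1
    unfold check_gen_alt
    by_cases hc : i < min tutors.length klasses.length
    · have hz : i < ((tutors.take (min tutors.length klasses.length)).zip
          (klasses.take (min tutors.length klasses.length))).length := by
        simp [List.length_zip]; omega
      rw [List.getElem_append_left (by simpa using hz)]
      have hk : i < klasses.length := by omega
      simp [List.getElem_zip, List.getElem_take, hk]
    · have hk : ¬ i < klasses.length := by omega
      have hmin : min tutors.length klasses.length = klasses.length := by omega
      have hlen1 : (((tutors.take (min tutors.length klasses.length)).zip
          (klasses.take (min tutors.length klasses.length))).map
          (fun tk => (tk.1, some tk.2))).length = klasses.length := by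
        simp [List.length_zip]; omega
      rw [List.getElem_append_right (by rw [hlen1]; omega)]
      simp [List.getElem_drop, hmin, hk]
      congr 1
      omega
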